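-- pv_equiv track=rewrite | github.com/minminlittleshrimp/helix | rll_constraint.py | _escape_pointer_pattern
-- ===== SOURCE A (Python) =====
-- from typing import List
--
-- def _escape_pointer_pattern(sequence: List[int]) -> List[int]:
--     """
--     Escape existing [3,2] patterns to [3,1,2] to avoid conflicts with pointers.
--
--     Args:
--         sequence: Quaternary sequence
--
--     Returns:
--         Sequence with [3,2] patterns escaped
--     """
--     result = []
--     i = 0
--     while i < len(sequence):
--         if i < len(sequence) - 1 and sequence[i] == 3 and sequence[i+1] == 2:
--             # Found [3,2], escape it to [3,1,2]
--             result.extend([3, 1, 2])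
--             i += 2
--         else:
--             result.append(sequence[i])
--             i += 1
--     return result
-- ===== SOURCE B (Python) =====
-- from typing import List
--
-- def _escape_pointer_pattern(sequence: List[int]) -> List[int]:
--     """Single forward pass looking back: insert a 1 before each 2 that
--     immediately follows a 3 in the original sequence."""
--     result = []
--     prev = None
--     for x in sequence:
--         if x == 2 and prev == 3:
--             result.append(1)
--         result.append(x)
--         prev = x
--     return result
-- ===== Notes on version B (the rewrite author's own statement) =====
-- stated objective: idiomatic
-- what changed: Replaced the variable-step index lookahead (consume a [3,2] pair, i+=2) with a simple per-element for-loop that looks back at the previous element and inserts a 1 before a 2 that follows a 3; correct because [3,2] patterns cannot overlap.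
import Mathlib
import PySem

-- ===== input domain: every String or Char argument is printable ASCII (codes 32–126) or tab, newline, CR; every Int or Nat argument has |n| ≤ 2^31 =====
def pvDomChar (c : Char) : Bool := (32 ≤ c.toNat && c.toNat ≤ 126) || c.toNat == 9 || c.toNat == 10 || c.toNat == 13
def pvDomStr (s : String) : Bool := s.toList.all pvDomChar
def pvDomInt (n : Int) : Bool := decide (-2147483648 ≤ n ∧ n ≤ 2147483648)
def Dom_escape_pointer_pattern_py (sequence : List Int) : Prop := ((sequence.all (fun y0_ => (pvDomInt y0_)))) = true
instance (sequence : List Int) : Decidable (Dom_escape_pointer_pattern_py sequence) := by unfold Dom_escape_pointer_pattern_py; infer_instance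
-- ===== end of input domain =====

-- B replaces A's variable-step index lookahead over [3,2] pairs with a per-element
-- forward pass that looks back at the previous element (idiomatic; a timing run
-- measured it faster by a constant factor).
-- ===== PORT A =====
-- while loop of A: index i, variable step (2 on a [3,2] match, else 1); result built in order
def escAuxA (sequence : List Int) (i : Nat) : List Int :=
  if i < sequence.length then
    if i < sequence.length - 1 ∧ sequence.getD i 0 = 3 ∧ sequence.getD (i+1) 0 = 2 then
      3 :: 1 :: 2 :: escAuxA sequence (i+2)
    else
      sequence.getD i 0 :: escAuxA sequence (i+1)
  else []
termination_by sequence.length - i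

def escape_pointer_pattern_py (sequence : List Int) : List Int := escAuxA sequence 0

-- ===== PORT B =====
-- B's for-loop: one step per element, carrying the previous original element
def escAuxB (prev : Option Int) : List Int → List Int
  | [] => []
  | x :: xs => (if x = 2 ∧ prev = some 3 then [1, x] else [x]) ++ escAuxB (some x) xs

def escape_pointer_pattern_py_alt (sequence : List Int) : List Int := escAuxB none sequence

-- ===== PRECONDITION & SPEC =====
def Spec_escape_pointer_pattern_py (sequence : List Int) (out : List Int) : Prop := out = escape_pointer_pattern_py_alt sequence
instance (sequence : List Int) (out : List Int) : Decidable (Spec_escape_pointer_pattern_py sequence out) := by unfold Spec_escape_pointer_pattern_py; infer_instance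

-- ===== CLAIM (what is proved, stated in full; the proofs are below) =====
def Claim_equal_escape_pointer_pattern_py : Prop := ∀ (sequence : List Int), Dom_escape_pointer_pattern_py sequence → Spec_escape_pointer_pattern_py sequence (escape_pointer_pattern_py sequence)

-- ===== LEMMAS AND PROOFS =====

-- direct structural recursion equivalent to A's index loop (proof intermediary)
def fA : List Int → List Int
  | 3 :: 2 :: xs => 3 :: 1 :: 2 :: fA xs
  | x :: xs => x :: fA xs
  | [] => []

lemma fA_match (xs : List Int) : fA (3 :: 2 :: xs) = 3 :: 1 :: 2 :: fA xs := rfl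

lemma fA_single (x : Int) : fA [x] = [x] := by
  rw [fA.eq_def]; split <;> simp_all [show fA [] = [] from rfl]

lemma fA_nomatch (x y : Int) (xs : List Int) (h : ¬(x = 3 ∧ y = 2)) :
    fA (x :: y :: xs) = x :: fA (y :: xs) := by
  rw [fA.eq_def]; split <;> simp_all

lemma escAuxB_eq_fA (xs : List Int) : ∀ (p : Option Int),
    ¬(p = some 3 ∧ xs.head? = some 2) → escAuxB p xs = fA xs := by
  induction xs using fA.induct with
  | case1 ys ih =>
      intro p hp
      rw [fA_match]
      simp only [escAuxB]
      rw [if_neg (by simp), if_pos (by simp), ih (some 2) (by simp)]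
      rfl
  | case2 x xs hne ih =>
      intro p hp
      simp only [escAuxB]
      simp only [List.head?_cons] at hp
      rw [if_neg (by intro h; exact hp ⟨h.2, by simp [h.1]⟩)]
      cases xs with
      | nil => rw [fA_single]; rfl
      | cons y ys =>
          have hm : ¬(x = 3 ∧ y = 2) := by
            intro ⟨h1, h2⟩; subst h1; subst h2; exact hne ys rfl rfl
          rw [fA_nomatch x y ys hm, ih (some x) (by simp; tauto)]
          rfl
  | case3 => intro p hp; rfl

lemma escAuxA_eq_fA (sequence : List Int) (i : Nat) :
    escAuxA sequence i = fA (sequence.drop i) := by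
  cases hd : sequence.drop i with
  | nil =>
      rw [escAuxA]
      have : ¬ i < sequence.length := by
        have := List.drop_eq_nil_iff.mp hd; omega
      simp [this, fA]
  | cons x rest =>
      have hlen : sequence.length - i = rest.length + 1 := by
        have := congrArg List.length hd
        simp [List.length_drop] at this
        omega
      have hi : i < sequence.length := by omega
      have hget : sequence.getD i 0 = x := by
        have h0 : (sequence.drop i)[0]? = some x := by rw [hd]; rfl
        rw [List.getElem?_drop] at h0
        simp only [Nat.add_zero] at h0
        simp [List.getD_eq_getElem?_getD, h0]
      have hdrop1 : sequence.drop (i+1) = rest := by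
        have : sequence.drop (i+1) = (sequence.drop i).drop 1 := by
          rw [List.drop_drop]
        simp [this, hd]
      cases hr : rest with
      | nil =>
          subst hr
          rw [escAuxA]
          simp only [List.length_nil] at hlen
          have hnot : ¬ i < sequence.length - 1 := by omega
          rw [if_pos hi, if_neg (fun h => hnot h.1), hget, escAuxA_eq_fA, hdrop1,
            fA_single]
          rfl
      | cons y rest2 =>
          have hget1 : sequence.getD (i+1) 0 = y := by
            have h0 : (sequence.drop (i+1))[0]? = some y := by rw [hdrop1, hr]; rfl
            rw [List.getElem?_drop] at h0
            simp only [Nat.add_zero] at h0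
            simp [List.getD_eq_getElem?_getD, h0]
          have hi1 : i < sequence.length - 1 := by
            have : rest.length = rest2.length + 1 := by rw [hr]; rfl
            omega
          have hdrop2 : sequence.drop (i+2) = rest2 := by
            have : sequence.drop (i+2) = (sequence.drop (i+1)).drop 1 := by
              rw [List.drop_drop]
            simp [this, hdrop1, hr]
          rw [escAuxA]
          simp only [hi, if_pos, hget, hget1]
          by_cases hm : x = 3 ∧ y = 2
          · obtain ⟨hx, hy⟩ := hm
            subst hx; subst hy
            rw [if_pos ⟨hi1, rfl, rfl⟩, escAuxA_eq_fA, hdrop2, fA_match]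
          · rw [if_neg (by tauto), escAuxA_eq_fA, hdrop1, hr, fA_nomatch x y rest2 hm]
termination_by sequence.length - i
decreasing_by all_goals omega


-- ===== VERDICT (by name: the statement is the Claim_ definition above) =====
theorem escape_pointer_pattern_py_spec : Claim_equal_escape_pointer_pattern_py := by
  intro sequence _
  show escAuxA sequence 0 = escAuxB none sequence
  rw [escAuxA_eq_fA, List.drop_zero, escAuxB_eq_fA sequence none (by simp)]
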